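-- pv_equiv track=rewrite | github.com/s0uthwood/channel-code-lab | hamming_16_11.py | hamming_encode
-- ===== SOURCE A (Python) =====
-- def hamming_encode(data: str) -> str:
--     data_tmp = '00' + data[0] + '0' + data[1:4] + '0' + data[4:]
--     parity = 0
--     for i in range(len(data_tmp)):
--         if data_tmp[i] == '1':
--             parity ^= i + 1
--     parity = (bin(parity)[2:].rjust(4, '0'))[::-1]
--     data_tmp = parity[:2] + data[0] + parity[2] + data[1:4] + parity[3] + data[4:]
--     return data_tmp + ('0' if parity_check(data_tmp) else '1')
--
-- def parity_check(data):
--     count = 0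
--     for c in data:
--         if c == '1':
--             count += 1
--     return count % 2 == 0
-- ===== SOURCE B (Python) =====
-- def hamming_encode(data: str) -> str:
--     data_tmp = '00' + data[0] + '0' + data[1:4] + '0' + data[4:]
--     bits = []
--     for j in range(4):
--         acc = 0
--         for i, c in enumerate(data_tmp):
--             if c == '1' and ((i + 1) >> j) & 1:
--                 acc ^= 1
--         bits.append('1' if acc else '0')
--     parity = ''.join(bits)
--     out = parity[:2] + data[0] + parity[2] + data[1:4] + parity[3] + data[4:]
--     ones = sum(1 for c in out if c == '1')
--     return out + ('0' if ones % 2 == 0 else '1')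
-- ===== Notes on version B (the rewrite author's own statement) =====
-- stated objective: alternative
-- what changed: Instead of XOR-accumulating all set-bit indices into one syndrome integer and decoding its bits via bin()/rjust/reverse string manipulation, B computes each of the four parity bits in its own direct scan (XOR of bit j of i+1 over set positions) and counts ones for the final even-parity bit.
import Mathlib
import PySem

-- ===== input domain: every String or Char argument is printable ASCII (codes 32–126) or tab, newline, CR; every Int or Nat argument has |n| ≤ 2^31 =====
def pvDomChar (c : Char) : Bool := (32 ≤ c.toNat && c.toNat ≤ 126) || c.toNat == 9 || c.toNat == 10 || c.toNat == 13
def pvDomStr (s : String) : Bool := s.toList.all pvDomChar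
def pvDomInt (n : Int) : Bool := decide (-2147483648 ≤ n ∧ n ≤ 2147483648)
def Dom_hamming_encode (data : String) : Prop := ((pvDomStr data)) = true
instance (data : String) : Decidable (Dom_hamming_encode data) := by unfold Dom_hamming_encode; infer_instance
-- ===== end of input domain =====

-- B replaces A's single XOR-syndrome accumulation plus bin()/rjust/reverse string decoding
-- with four direct per-bit parity scans (objective: alternative decomposition, not faster).

-- ===== PORT A =====

-- hand port of bin(n)[2:] for a nonnegative n (the only case A reaches: parity ≥ 0);
-- builds the most-significant-bit-first digit list exactly as Python's bin does
def natToBinAux : Nat → List Char → List Char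
  | 0, acc => acc
  | n+1, acc => natToBinAux ((n+1)/2) ((if (n+1) % 2 = 1 then '1' else '0') :: acc)
  decreasing_by exact Nat.div_lt_self (Nat.succ_pos n) one_lt_two

def binChars (n : Nat) : List Char := if n = 0 then ['0'] else natToBinAux n []

-- data_tmp = '00' + data[0] + '0' + data[1:4] + '0' + data[4:]  (identical line in A and B)
def aData_tmp (l : List Char) (d0 : Char) : List Char :=
  ['0', '0', d0, '0'] ++ PySem.List.slice l (some 1) (some 4)
    ++ '0' :: PySem.List.slice l (some 4) none

-- for i in range(len(data_tmp)): if data_tmp[i] == '1': parity ^= i + 1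
-- (parity is a nonnegative Python int throughout; the index is provably in range)
def aParity (tmp : List Char) : Nat :=
  (List.range tmp.length).foldl
    (fun (p : Nat) (i : Nat) =>
      if (PySem.List.pyGet? tmp (i : Int)).getD ' ' = '1' then p ^^^ (i + 1) else p) 0

-- parity = (bin(parity)[2:].rjust(4, '0'))[::-1]
def aParityStr (p : Nat) : List Char :=
  (List.replicate (4 - (binChars p).length) '0' ++ binChars p).reverse

-- A's helper parity_check
def parity_check (l : List Char) : Bool :=
  (l.foldl (fun n c => if c = '1' then n + 1 else n) 0) % 2 == 0

def hamming_encode (data : String) : String :=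
  let l := data.toList
  let d0 := (PySem.List.pyGet? l 0).getD ' '   -- data[0]; none only outside Pre_ (empty data raises IndexError)
  let tmp := aData_tmp l d0
  let ps := aParityStr (aParity tmp)
  -- parity[:2] + data[0] + parity[2] + data[1:4] + parity[3] + data[4:]  (len(parity) ≥ 4 always)
  let out := ps.take 2 ++ [d0] ++ [ps.getD 2 '0'] ++ PySem.List.slice l (some 1) (some 4)
      ++ [ps.getD 3 '0'] ++ PySem.List.slice l (some 4) none
  String.ofList (out ++ [if parity_check out then '0' else '1'])

-- ===== PORT B =====

-- acc over enumerate(data_tmp): acc ^= 1 whenever c == '1' and bit j of (i+1) is set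
def altBit (tmp : List Char) (j : Nat) : Nat :=
  tmp.zipIdx.foldl
    (fun acc ci => if ci.1 = '1' ∧ ((ci.2 + 1) >>> j) &&& 1 ≠ 0 then acc ^^^ 1 else acc) 0

def hamming_encode_alt (data : String) : String :=
  let l := data.toList
  let d0 := (PySem.List.pyGet? l 0).getD ' '   -- data[0]; raises on empty data, outside Pre_
  let tmp := aData_tmp l d0
  let bits := (List.range 4).map (fun j => if altBit tmp j ≠ 0 then '1' else '0')
  let out := bits.take 2 ++ [d0] ++ [bits.getD 2 '0'] ++ PySem.List.slice l (some 1) (some 4)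
      ++ [bits.getD 3 '0'] ++ PySem.List.slice l (some 4) none
  let ones := (out.filter (fun c => c = '1')).length
  String.ofList (out ++ [if ones % 2 = 0 then '0' else '1'])

-- ===== PRECONDITION & SPEC =====
-- Pre_ excludes only the empty string, on which A (and B) raise IndexError at data[0].
def Pre_hamming_encode (data : String) : Prop := data ≠ ""
instance (data : String) : Decidable (Pre_hamming_encode data) := by
  unfold Pre_hamming_encode; infer_instance
def pvWitness_hamming_encode : String := "10110101011"

def Spec_hamming_encode (data : String) (out : String) : Prop := out = hamming_encode_alt data
instance (data : String) (out : String) : Decidable (Spec_hamming_encode data out) := by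
  unfold Spec_hamming_encode; infer_instance

-- ===== CLAIM (what is proved, stated in full; the proofs are below) =====
def Claim_equal_hamming_encode : Prop :=
  ∀ (data : String), Dom_hamming_encode data → Pre_hamming_encode data →
    Spec_hamming_encode data (hamming_encode data)

-- ===== LEMMAS AND PROOFS =====

lemma natToBinAux_append (n : Nat) : ∀ (acc : List Char),
    natToBinAux n acc = natToBinAux n [] ++ acc := by
  induction n using Nat.strong_induction_on with
  | _ n ih =>
    intro acc
    match n with
    | 0 => simp [natToBinAux]
    | m+1 =>
      rw [natToBinAux, natToBinAux,
        ih ((m+1)/2) (Nat.div_lt_self (Nat.succ_pos m) one_lt_two)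
          ((if (m+1) % 2 = 1 then '1' else '0') :: acc),
        ih ((m+1)/2) (Nat.div_lt_self (Nat.succ_pos m) one_lt_two)
          [if (m+1) % 2 = 1 then '1' else '0']]
      simp

lemma revAux_getD (n : Nat) : ∀ (k : Nat),
    ((natToBinAux n []).reverse).getD k '0' = if n.testBit k then '1' else '0' := by
  induction n using Nat.strong_induction_on with
  | _ n ih =>
    intro k
    match n with
    | 0 => simp [natToBinAux, Nat.zero_testBit]
    | m+1 =>
      rw [natToBinAux, natToBinAux_append, List.reverse_append]
      simp only [List.reverse_cons, List.reverse_nil, List.nil_append, List.singleton_append]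
      match k with
      | 0 =>
        rw [List.getD_cons_zero, Nat.testBit_zero]
        by_cases h : (m+1) % 2 = 1 <;> simp [h]
      | k+1 =>
        rw [List.getD_cons_succ,
          ih ((m+1)/2) (Nat.div_lt_self (Nat.succ_pos m) one_lt_two) k,
          Nat.testBit_succ]

lemma binChars_rev_getD (n k : Nat) :
    ((binChars n).reverse).getD k '0' = if n.testBit k then '1' else '0' := by
  unfold binChars
  by_cases h : n = 0
  · subst h
    match k with
    | 0 => simp
    | k+1 => simp [Nat.zero_testBit]
  · rw [if_neg h]; exact revAux_getD n k

lemma getD_append_replicate (l : List Char) (m k : Nat) :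
    (l ++ List.replicate m '0').getD k '0' = l.getD k '0' := by
  by_cases h : k < l.length
  · exact List.getD_append _ _ _ _ h
  · simp only [List.getD_eq_getElem?_getD,
      List.getElem?_append_right (Nat.le_of_not_lt h), List.getElem?_replicate]
    rw [List.getElem?_eq_none (Nat.le_of_not_lt h)]
    by_cases h2 : k - l.length < m <;> simp [h2]

lemma aParityStr_getD (p k : Nat) :
    (aParityStr p).getD k '0' = if p.testBit k then '1' else '0' := by
  unfold aParityStr
  rw [List.reverse_append, List.reverse_replicate, getD_append_replicate, binChars_rev_getD]

lemma aParityStr_len (p : Nat) : 4 ≤ (aParityStr p).length := by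
  unfold aParityStr
  simp only [List.length_reverse, List.length_append, List.length_replicate]
  omega

lemma take_two_eq (l : List Char) (h : 2 ≤ l.length) :
    l.take 2 = [l.getD 0 '0', l.getD 1 '0'] := by
  match l with
  | [] => simp at h
  | [a] => simp at h
  | a :: b :: t => simp

-- A's index loop over range(len(tmp)) equals the fold over the indexed list
lemma foldA_shift : ∀ (suf pre : List Char) (p : Nat),
    (List.range' pre.length suf.length).foldl
      (fun (p : Nat) (i : Nat) => if (PySem.List.pyGet? (pre ++ suf) (i : Int)).getD ' ' = '1'
        then p ^^^ (i + 1) else p) p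
    = (suf.zipIdx pre.length).foldl
        (fun p ci => if ci.1 = '1' then p ^^^ (ci.2 + 1) else p) p := by
  intro suf
  induction suf with
  | nil => intro pre p; simp
  | cons c rest ih =>
    intro pre p
    rw [List.length_cons, List.range'_succ, List.foldl_cons, List.zipIdx_cons, List.foldl_cons,
      PySem.List.pyGet?_append_length]
    have hre : pre ++ c :: rest = (pre ++ [c]) ++ rest := by simp
    have hlen : pre.length + 1 = (pre ++ [c]).length := by simp
    rw [hre, hlen, ih]
    simp

lemma testBit_iff (i j : Nat) : ((i >>> j) &&& 1 ≠ 0) ↔ i.testBit j = true := by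
  rw [Nat.testBit_eq_decide_div_mod_eq, Nat.and_one_is_mod, Nat.shiftRight_eq_div_pow]
  have := Nat.mod_two_eq_zero_or_one (i / 2 ^ j)
  constructor <;> intro h <;> simp_all

lemma bit_fold (j : Nat) : ∀ (s : List (Char × Nat)) (p a : Nat),
    a = (if p.testBit j then 1 else 0) →
    s.foldl (fun acc ci => if ci.1 = '1' ∧ ((ci.2 + 1) >>> j) &&& 1 ≠ 0 then acc ^^^ 1 else acc) a
    = if (s.foldl (fun p ci => if ci.1 = '1' then p ^^^ (ci.2 + 1) else p) p).testBit j
        then 1 else 0 := by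
  intro s
  induction s with
  | nil => intro p a ha; simpa using ha
  | cons ci rest ih =>
    intro p a ha
    rw [List.foldl_cons, List.foldl_cons]
    by_cases hc : ci.1 = '1'
    · by_cases hb : (ci.2 + 1).testBit j = true
      · have hb' : ((ci.2 + 1) >>> j) &&& 1 ≠ 0 := (testBit_iff _ _).mpr hb
        rw [if_pos ⟨hc, hb'⟩, if_pos hc]
        apply ih
        rw [Nat.testBit_xor, hb, ha]
        by_cases hp : p.testBit j <;> simp [hp]
      · have hb' : ¬ (((ci.2 + 1) >>> j) &&& 1 ≠ 0) := fun h => hb ((testBit_iff _ _).mp h)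
        rw [if_neg (fun h => hb' h.2), if_pos hc]
        apply ih
        rw [Nat.testBit_xor, ha]
        simp only [Bool.not_eq_true] at hb
        rw [hb]
        by_cases hp : p.testBit j <;> simp [hp]
    · rw [if_neg (fun h => hc h.1), if_neg hc]
      exact ih p a ha

lemma altBit_eq (tmp : List Char) (j : Nat) :
    altBit tmp j = if (aParity tmp).testBit j then 1 else 0 := by
  have hA : aParity tmp
      = (tmp.zipIdx 0).foldl (fun p ci => if ci.1 = '1' then p ^^^ (ci.2 + 1) else p) 0 := by
    have h := foldA_shift tmp [] 0
    simp only [List.nil_append, List.length_nil] at h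
    unfold aParity
    rw [List.range_eq_range']
    exact h
  unfold altBit
  rw [hA]
  exact bit_fold j (tmp.zipIdx 0) 0 0 (by simp)

lemma count_foldl : ∀ (l : List Char) (n : Nat),
    l.foldl (fun n c => if c = '1' then n + 1 else n) n
      = n + (l.filter (fun c => c = '1')).length := by
  intro l
  induction l with
  | nil => simp
  | cons c rest ih =>
    intro n
    by_cases h : c = '1'
    · simp [h, ih]
      omega
    · simp [h, ih]

lemma last_char (out : List Char) :
    (if parity_check out then '0' else '1')
      = (if (out.filter (fun c => c = '1')).length % 2 = 0 then '0' else '1') := by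
  unfold parity_check
  rw [count_foldl]
  by_cases h : (out.filter (fun c => c = '1')).length % 2 = 0 <;> simp [h]

-- ===== VERDICT (by name: the statement is the Claim_ definition above) =====
theorem hamming_encode_spec : Claim_equal_hamming_encode := by
  intro data _ _
  unfold Spec_hamming_encode
  simp only [hamming_encode, hamming_encode_alt]
  generalize data.toList = l
  generalize (PySem.List.pyGet? l 0).getD ' ' = d0
  generalize aData_tmp l d0 = tmp
  generalize hP : aParity tmp = P
  generalize hps : aParityStr P = ps
  have hget : ∀ k : Nat, ps.getD k '0' = if P.testBit k then '1' else '0' := by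
    intro k; rw [← hps]; exact aParityStr_getD P k
  have hlen : 4 ≤ ps.length := hps ▸ aParityStr_len P
  have haltbit : ∀ j : Nat, altBit tmp j = if P.testBit j then 1 else 0 := by
    intro j; rw [← hP]; exact altBit_eq tmp j
  have hch : ∀ b : Bool, (if (if b then 1 else 0) ≠ 0 then '1' else '0')
      = (if b then '1' else '0') := by
    intro b; cases b <;> simp
  have hbits : (List.range 4).map (fun j => if altBit tmp j ≠ 0 then '1' else '0')
      = [ps.getD 0 '0', ps.getD 1 '0', ps.getD 2 '0', ps.getD 3 '0'] := by
    rw [show List.range 4 = [0, 1, 2, 3] from rfl]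
    simp only [List.map_cons, List.map_nil]
    rw [haltbit 0, haltbit 1, haltbit 2, haltbit 3, hget 0, hget 1, hget 2, hget 3]
    simp only [hch]
  rw [hbits]
  rw [take_two_eq ps (by omega)]
  rw [show List.take 2 [ps.getD 0 '0', ps.getD 1 '0', ps.getD 2 '0', ps.getD 3 '0']
      = [ps.getD 0 '0', ps.getD 1 '0'] from rfl]
  rw [show ([ps.getD 0 '0', ps.getD 1 '0', ps.getD 2 '0', ps.getD 3 '0']).getD 2 '0'
      = ps.getD 2 '0' from rfl]
  rw [show ([ps.getD 0 '0', ps.getD 1 '0', ps.getD 2 '0', ps.getD 3 '0']).getD 3 '0'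
      = ps.getD 3 '0' from rfl]
  rw [last_char]
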